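-- pv_equiv track=rewrite | github.com/rulitka/basic | 20.py | reset_history
-- ===== SOURCE A (Python) =====
-- def reset_history(history, position_in_history):
--     history_new = []
--     for i in range(len(history)):
--         if i == position_in_history:
--             history_new.append(history[i])
--         else:
--             continue
--     history = history_new
--     return history
-- ===== SOURCE B (Python) =====
-- def reset_history(history, position_in_history):
--     if 0 <= position_in_history < len(history):
--         return [history[position_in_history]]
--     return []
-- ===== Notes on version B (the rewrite author's own statement) =====
-- stated objective: simpler
-- what changed: Replaced A's scan over all indices (building a list by appending on the matching index) with a single O(1) bounds check and direct index access.
import Mathlib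
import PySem

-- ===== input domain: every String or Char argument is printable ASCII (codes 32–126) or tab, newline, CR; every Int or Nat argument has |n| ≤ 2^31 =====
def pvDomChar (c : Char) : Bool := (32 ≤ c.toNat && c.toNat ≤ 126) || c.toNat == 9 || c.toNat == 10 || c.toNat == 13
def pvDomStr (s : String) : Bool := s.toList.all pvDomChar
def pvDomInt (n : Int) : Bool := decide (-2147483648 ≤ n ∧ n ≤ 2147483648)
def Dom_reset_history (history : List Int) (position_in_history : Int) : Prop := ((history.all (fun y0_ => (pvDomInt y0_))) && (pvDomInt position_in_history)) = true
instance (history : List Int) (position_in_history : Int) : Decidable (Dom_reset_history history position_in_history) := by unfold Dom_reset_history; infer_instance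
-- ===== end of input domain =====

-- B replaces A's scan over all indices with one bounds check and a direct access (simpler, O(1)).

-- ===== PORT A =====
-- history[i] is always in range inside the loop, so pyGetD is exact here.
def reset_history (history : List Int) (position_in_history : Int) : List Int :=
  (PySem.List.pyRange 0 history.length 1).foldl
    (fun history_new i =>
      if i == position_in_history then history_new ++ [PySem.List.pyGetD history i 0]
      else history_new) []

-- ===== PORT B =====
def reset_history_alt (history : List Int) (position_in_history : Int) : List Int :=
  if 0 ≤ position_in_history ∧ position_in_history < (history.length : Int) then
    [PySem.List.pyGetD history position_in_history 0]
  else []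

-- ===== PRECONDITION & SPEC =====
def Spec_reset_history (history : List Int) (position_in_history : Int) (out : List Int) : Prop := out = reset_history_alt history position_in_history
instance (history : List Int) (position_in_history : Int) (out : List Int) : Decidable (Spec_reset_history history position_in_history out) := by unfold Spec_reset_history; infer_instance

-- ===== CLAIM (what is proved, stated in full; the proofs are below) =====
def Claim_equal_reset_history : Prop := ∀ (history : List Int) (position_in_history : Int), Dom_reset_history history position_in_history → Spec_reset_history history position_in_history (reset_history history position_in_history)

-- ===== LEMMAS AND PROOFS =====

-- range filtered for equality with p keeps at most the single element p
theorem filter_pyRange_eq (n : Int) (p : Int) :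
    (PySem.List.pyRange 0 n 1).filter (fun i => i == p) =
      if 0 ≤ p ∧ p < n then [p] else [] := by
  by_cases h : n ≤ 0
  · rw [PySem.List.pyRange_one_eq_nil h]
    simp only [List.filter_nil]
    rw [if_neg (by omega)]
  · obtain ⟨m, rfl⟩ : ∃ m : Nat, n = (m : Int) := ⟨n.toNat, by omega⟩
    clear h
    induction m with
    | zero => simp
    | succ m ih =>
      rw [show ((m + 1 : Nat) : Int) = (m : Int) + 1 by push_cast; ring,
        PySem.List.pyRange_one_succ_right (by positivity), List.filter_append, ih]
      simp only [List.filter_cons, List.filter_nil]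
      by_cases hp : (m : Int) == p
      · rw [if_pos hp]
        have : (m : Int) = p := by simpa using hp
        rw [if_neg (by omega), if_pos (by omega)]
        simp [this]
      · rw [if_neg hp]
        have : ¬ (m : Int) = p := by simpa using hp
        by_cases h1 : 0 ≤ p ∧ p < (m : Int)
        · rw [if_pos h1, if_pos (by omega)]; simp
        · rw [if_neg h1, if_neg (by omega)]; simp

-- ===== VERDICT (by name: the statement is the Claim_ definition above) =====
theorem reset_history_spec : Claim_equal_reset_history := by
  intro history p _
  show _ = _
  rw [reset_history, PySem.List.foldl_append_if (fun i => i == p)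
      (fun i => PySem.List.pyGetD history i 0), filter_pyRange_eq]
  unfold reset_history_alt
  split_ifs <;> simp
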